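-- pv_equiv track=rewrite | github.com/tgrbrooks/adventofcode-2022 | day17-1/solution.py | get_rocks
-- ===== SOURCE A (Python) =====
-- def get_rocks(rock_input):
--   rocks = []
--   rock = []
--   for line in rock_input.split('\n'):
--     if '#' not in line:
--       rock.reverse()
--       rocks.append(rock)
--       rock = []
--       continue
--     rock.append(list(line))
--   rock.reverse()
--   rocks.append(rock)
--   return rocks
-- ===== SOURCE B (Python) =====
-- def get_rocks(rock_input):
--   lines = rock_input.split('\n')
--   seps = [i for i, l in enumerate(lines) if '#' not in l]
--   bounds = [-1] + seps + [len(lines)]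
--   rocks = []
--   for a, b in zip(bounds, bounds[1:]):
--     rocks.append([list(l) for l in reversed(lines[a + 1:b])])
--   return rocks
-- ===== Notes on version B (the rewrite author's own statement) =====
-- stated objective: alternative
-- what changed: Replaces A's single-pass accumulate-and-flush loop (mutable current-rock buffer flushed at each separator and once at the end) by an index-based decomposition: collect the positions of separator lines, turn them into boundary pairs, and slice-and-reverse each segment.
import Mathlib
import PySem

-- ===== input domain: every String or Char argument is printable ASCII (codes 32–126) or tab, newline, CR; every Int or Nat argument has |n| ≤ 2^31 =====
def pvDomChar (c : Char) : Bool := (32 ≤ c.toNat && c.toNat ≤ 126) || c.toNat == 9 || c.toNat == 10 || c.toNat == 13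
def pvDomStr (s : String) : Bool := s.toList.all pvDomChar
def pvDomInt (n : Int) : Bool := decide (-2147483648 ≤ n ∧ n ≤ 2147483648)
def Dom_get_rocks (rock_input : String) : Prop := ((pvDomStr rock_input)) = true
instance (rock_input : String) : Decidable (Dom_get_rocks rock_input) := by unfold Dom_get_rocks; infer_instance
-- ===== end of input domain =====

-- B replaces A's accumulate-and-flush loop by an index pass (separator positions → boundary pairs → slices); same cost, different decomposition ("alternative").

-- lines = s.split('\n'); the separator is nonempty so Python never raises and split? is always `some`
def pvLines (s : String) : List String := (PySem.Str.split? s "\n").getD []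

-- ===== PORT A =====
def get_rocks (rock_input : String) : List (List (List String)) :=
  let st := (pvLines rock_input).foldl
    (fun (st : List (List (List String)) × List (List String)) (line : String) =>
      if PySem.Str.isIn "#" line = false then
        (st.1 ++ [st.2.reverse], [])
      else
        (st.1, st.2 ++ [line.toList.map Char.toString]))
    ([], [])
  st.1 ++ [st.2.reverse]

-- ===== PORT B =====
def get_rocks_alt (rock_input : String) : List (List (List String)) :=
  let lines := pvLines rock_input
  let seps : List Int := (PySem.List.enumerate lines 0).filterMap
    (fun q => if PySem.Str.isIn "#" q.2 = false then some q.1 else none)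
  let bounds : List Int := [-1] ++ seps ++ [(lines.length : Int)]
  (bounds.zip bounds.tail).map
    (fun q => ((PySem.List.slice lines (some (q.1 + 1)) (some q.2)).reverse).map
      (fun l => l.toList.map Char.toString))

-- ===== PRECONDITION & SPEC =====
def Spec_get_rocks (rock_input : String) (out : List (List (List String))) : Prop := out = get_rocks_alt rock_input
instance (rock_input : String) (out : List (List (List String))) : Decidable (Spec_get_rocks rock_input out) := by unfold Spec_get_rocks; infer_instance

-- ===== CLAIM (what is proved, stated in full; the proofs are below) =====
def Claim_equal_get_rocks : Prop := ∀ (rock_input : String), Dom_get_rocks rock_input → Spec_get_rocks rock_input (get_rocks rock_input)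

-- ===== LEMMAS AND PROOFS =====

-- the separator predicate and the row conversion, shared vocabulary for the proofs
def pvSep (l : String) : Bool := PySem.Str.isIn "#" l = false
def pvRow (l : String) : List String := l.toList.map Char.toString

-- A's loop body, named for the induction
def pvStepA (st : List (List (List String)) × List (List String)) (line : String) :
    List (List (List String)) × List (List String) :=
  if PySem.Str.isIn "#" line = false then (st.1 ++ [st.2.reverse], [])
  else (st.1, st.2 ++ [line.toList.map Char.toString])

lemma get_rocks_eq_foldA (s : String) :
    get_rocks s =
      ((pvLines s).foldl pvStepA ([], [])).1 ++
        [((pvLines s).foldl pvStepA ([], [])).2.reverse] := rfl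

-- A's fold characterised by splitOnP
lemma foldA_splitOnP : ∀ (ls : List String) (rocks : List (List (List String)))
    (rock : List (List String)) (s₀ : List String) (rest : List (List String)),
    ls.splitOnP pvSep = s₀ :: rest →
    (ls.foldl pvStepA (rocks, rock)).1 ++ [(ls.foldl pvStepA (rocks, rock)).2.reverse]
      = rocks ++ ((rock ++ s₀.map pvRow).reverse ::
          rest.map (fun seg => (seg.map pvRow).reverse)) := by
  intro ls
  induction ls with
  | nil =>
    intro rocks rock s₀ rest h
    rw [List.splitOnP_nil] at h
    obtain ⟨rfl, rfl⟩ : s₀ = [] ∧ rest = [] := by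
      constructor <;> injection h with h1 h2 <;> simp_all
    simp
  | cons l ls ih =>
    intro rocks rock s₀ rest h
    rw [List.splitOnP_cons] at h
    obtain ⟨t₀, rest', ht⟩ : ∃ t₀ rest', ls.splitOnP pvSep = t₀ :: rest' := by
      rcases he : ls.splitOnP pvSep with _ | ⟨a, b⟩
      · exact absurd he (List.splitOnP_ne_nil _ _)
      · exact ⟨a, b, rfl⟩
    by_cases hp : pvSep l
    · rw [if_pos hp] at h
      obtain ⟨rfl, rfl⟩ : s₀ = [] ∧ rest = ls.splitOnP pvSep := by
        constructor <;> injection h with h1 h2 <;> simp_all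
      have hstep : List.foldl pvStepA (rocks, rock) (l :: ls)
          = List.foldl pvStepA (rocks ++ [rock.reverse], []) ls := by
        simp [pvSep] at hp
        simp [pvStepA, hp]
      rw [hstep, ih (rocks ++ [rock.reverse]) [] t₀ rest' ht, ht]
      simp
    · rw [if_neg hp, ht] at h
      obtain ⟨rfl, rfl⟩ : s₀ = l :: t₀ ∧ rest = rest' := by
        constructor <;> injection h with h1 h2 <;> simp_all
      have hstep : List.foldl pvStepA (rocks, rock) (l :: ls)
          = List.foldl pvStepA (rocks, rock ++ [pvRow l]) ls := by
        simp [pvSep] at hp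
        simp [pvStepA, hp, pvRow]
      rw [hstep, ih rocks (rock ++ [pvRow l]) t₀ rest ht]
      simp

-- B's separator-index list, named for the induction
def pvSeps (ls : List String) : List Int :=
  (PySem.List.enumerate ls 0).filterMap
    (fun q => if PySem.Str.isIn "#" q.2 = false then some q.1 else none)

-- B's boundary-pair slicing, with the boundary list abstracted for the induction
def pvPairs (ls : List String) (bs : List Int) : List (List String) :=
  (bs.zip bs.tail).map (fun q => PySem.List.slice ls (some (q.1 + 1)) (some q.2))

def pvSegs (ls : List String) : List (List String) :=
  pvPairs ls ((-1) :: (pvSeps ls ++ [(ls.length : Int)]))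

lemma pvPairs_cons_cons (ls : List String) (a b : Int) (bs : List Int) :
    pvPairs ls (a :: b :: bs) = PySem.List.slice ls (some (a + 1)) (some b) :: pvPairs ls (b :: bs) := rfl

lemma enumerate_shift {α : Type} (ls : List α) : ∀ s : Int,
    PySem.List.enumerate ls (s + 1) = (PySem.List.enumerate ls s).map (fun q => (q.1 + 1, q.2)) := by
  induction ls with
  | nil => intro s; simp [PySem.List.enumerate_nil]
  | cons x xs ih => intro s; simp [PySem.List.enumerate_cons, ih]

lemma pvSeps_cons (l : String) (ls : List String) :
    pvSeps (l :: ls) = (if pvSep l then [(0 : Int)] else []) ++ (pvSeps ls).map (· + 1) := by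
  unfold pvSeps
  rw [PySem.List.enumerate_cons, enumerate_shift ls 0]
  by_cases hp : pvSep l <;>
    [simp [pvSep] at hp; simp [pvSep] at hp] <;>
    simp [pvSep, hp, List.filterMap_map, List.map_filterMap, Function.comp] <;> rfl

lemma pvSeps_nonneg (ls : List String) : ∀ x ∈ pvSeps ls, 0 ≤ x := by
  induction ls with
  | nil => simp [pvSeps, PySem.List.enumerate_nil]
  | cons l ls ih =>
    intro x hx
    rw [pvSeps_cons] at hx
    rcases List.mem_append.mp hx with h | h
    · split_ifs at h <;> simp_all
    · obtain ⟨y, hy, rfl⟩ := List.mem_map.mp h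
      have := ih y hy; omega

lemma slice_cons_succ {α : Type} (x : α) (xs : List α) (i j : Int) (hi : 0 ≤ i) (hj : 0 ≤ j) :
    PySem.List.slice (x :: xs) (some (i + 1)) (some (j + 1)) = PySem.List.slice xs (some i) (some j) := by
  rw [PySem.List.slice_toNat _ (by omega) (by omega), PySem.List.slice_toNat _ hi hj]
  have h1 : (i + 1).toNat = i.toNat + 1 := by omega
  rw [h1]
  have h2 : (j + 1).toNat - (i.toNat + 1) = j.toNat - i.toNat := by omega
  rw [h2, List.drop_succ_cons]

lemma slice_zero_cons_succ {α : Type} (x : α) (xs : List α) (j : Int) (hj : 0 ≤ j) :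
    PySem.List.slice (x :: xs) (some 0) (some (j + 1)) = x :: PySem.List.slice xs (some 0) (some j) := by
  rw [PySem.List.slice_toNat _ le_rfl (by omega), PySem.List.slice_toNat _ le_rfl hj]
  have h1 : (j + 1).toNat = j.toNat + 1 := by omega
  simp [h1]

lemma pvShift (l : String) (ls : List String) : ∀ (bs : List Int) (a : Int), -1 ≤ a →
    (∀ x ∈ bs, 0 ≤ x) →
    pvPairs (l :: ls) ((a + 1) :: bs.map (· + 1)) = pvPairs ls (a :: bs) := by
  intro bs
  induction bs with
  | nil => intro a _ _; rfl
  | cons b bs ih =>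
    intro a ha hnn
    have hb : 0 ≤ b := hnn b (by simp)
    rw [List.map_cons, pvPairs_cons_cons, pvPairs_cons_cons,
      slice_cons_succ l ls (a + 1) b (by omega) hb,
      ih b (by omega) (fun x hx => hnn x (by simp [hx]))]

lemma pvSegs_eq_splitOnP : ∀ ls : List String, pvSegs ls = ls.splitOnP pvSep := by
  intro ls
  induction ls with
  | nil =>
    rw [List.splitOnP_nil]
    show pvPairs [] [-1, 0] = [[]]
    rw [pvPairs_cons_cons]
    have e0 : (-1 : Int) + 1 = 0 := by norm_num
    rw [e0, PySem.List.slice_toNat _ le_rfl le_rfl]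
    rfl
  | cons l ls ih =>
    have hnnapp : ∀ x ∈ pvSeps ls ++ [(ls.length : Int)], 0 ≤ x := by
      intro x hx
      rcases List.mem_append.mp hx with h | h
      · exact pvSeps_nonneg ls x h
      · simp at h; omega
    have hlen : ((l :: ls).length : Int) = (ls.length : Int) + 1 := by
      push_cast [List.length_cons]; ring
    rw [List.splitOnP_cons]
    by_cases hp : pvSep l
    · rw [if_pos hp, ← ih]
      have hb : pvSeps (l :: ls) ++ [((l :: ls).length : Int)]
          = ((-1 : Int) + 1) :: (pvSeps ls ++ [(ls.length : Int)]).map (· + 1) := by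
        rw [pvSeps_cons, if_pos hp, hlen]
        simp
      unfold pvSegs
      rw [hb, pvPairs_cons_cons, pvShift l ls _ (-1) le_rfl hnnapp]
      congr 1
    · rw [if_neg hp, ← ih]
      rcases he : pvSeps ls ++ [(ls.length : Int)] with _ | ⟨c, cs⟩
      · simp at he
      have hc : 0 ≤ c := by rw [he] at hnnapp; exact hnnapp c (by simp)
      have hcs : ∀ x ∈ cs, 0 ≤ x := by
        intro x hx; rw [he] at hnnapp; exact hnnapp x (by simp [hx])
      have hb : pvSeps (l :: ls) ++ [((l :: ls).length : Int)]
          = (c + 1) :: cs.map (· + 1) := by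
        rw [pvSeps_cons, if_neg hp, hlen]
        have : (pvSeps ls).map (· + 1) ++ [(ls.length : Int) + 1]
            = (pvSeps ls ++ [(ls.length : Int)]).map (· + 1) := by simp
        simp only [List.nil_append, this, he, List.map_cons]
      unfold pvSegs
      rw [hb, he, pvPairs_cons_cons, pvPairs_cons_cons, pvShift l ls cs c (by omega) hcs]
      have e0 : (-1 : Int) + 1 = 0 := by norm_num
      rw [e0, slice_zero_cons_succ l ls c hc]
      rfl

lemma get_rocks_alt_eq (s : String) :
    get_rocks_alt s = (pvSegs (pvLines s)).map (fun seg => (seg.reverse).map pvRow) := by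
  simp [get_rocks_alt, pvSegs, pvSeps, pvPairs, pvRow, List.map_map, Function.comp]

-- ===== VERDICT (by name: the statement is the Claim_ definition above) =====
theorem get_rocks_spec : Claim_equal_get_rocks := by
  intro s _
  unfold Spec_get_rocks
  rw [get_rocks_eq_foldA, get_rocks_alt_eq, pvSegs_eq_splitOnP]
  obtain ⟨s₀, rest, h⟩ : ∃ s₀ rest,
      (pvLines s).splitOnP pvSep = s₀ :: rest := by
    rcases he : (pvLines s).splitOnP pvSep with _ | ⟨a, b⟩
    · exact absurd he (List.splitOnP_ne_nil _ _)
    · exact ⟨a, b, rfl⟩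
  rw [foldA_splitOnP _ [] [] s₀ rest h, h]
  simp
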